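-- pv_equiv track=rewrite | github.com/fLaViUsGr/SAT_Implementations | DavisPutnam_SAT_Implementation.py | _dp_simplify_clauses
-- ===== SOURCE A (Python) =====
-- def _dp_simplify_clauses(clauses_set_of_sets, literal_to_make_true):
--     """
--     Simplifies a list of clauses (represented as sets of literals)
--     given that literal_to_make_true is true.
--     - Removes clauses containing literal_to_make_true.
--     - Removes -literal_to_make_true from clauses where it appears.
--     Returns: A new list of simplified clauses (as sets), and a conflict flag.
--              Conflict is True if an empty clause is generated.
--     """
--     new_clauses = []
--     conflict = False
--     for c_orig in clauses_set_of_sets: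
--         c = set(c_orig) # Work with a mutable copy
--         if literal_to_make_true in c:
--             continue # Clause satisfied
--
--         if -literal_to_make_true in c:
--             c.remove(-literal_to_make_true)
--
--         if not c: # Clause became empty
--              # Check if it became empty *because* -literal_to_make_true was in original c_orig
--              # This condition is a bit tricky. An empty clause is an empty clause.
--              # The original check was: if not simplified_clause and -literal_to_make_true in c_orig_before_potential_removal:
--              # This means the literal whose negation was removed was the *only* literal.
--             if -literal_to_make_true in c_orig: # It became empty due to this simplification
--                 conflict = True
--                 break
--             # If it was already empty, or became empty for other reasons, it's still a problem
--             # but the conflict flag is more about *this specific* simplification causing it.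
--             # However, an empty clause means conflict regardless.
--             # For DP, an empty clause at any point is a conflict.
--             conflict = True
--             break
--
--         new_clauses.append(c)
--
--     if conflict:
--         # Returning [{}] (list containing an empty set) is a clear signal of an empty clause.
--         return [set()], True
--     return new_clauses, False
-- ===== SOURCE B (Python) =====
-- def _dp_simplify_clauses(clauses_set_of_sets, literal_to_make_true):
--     # Phase 1: detect conflict on the RAW clauses, without building any set:
--     # a clause yields the empty clause iff it does not contain the literal and
--     # every one of its elements is -literal (vacuously true for an empty clause).
--     for c in clauses_set_of_sets:
--         if literal_to_make_true not in c and all(x == -literal_to_make_true for x in c):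
--             return [set()], True
--     # Phase 2: no conflict possible -- build the simplified clause sets.
--     return [set(c) - {-literal_to_make_true}
--             for c in clauses_set_of_sets
--             if literal_to_make_true not in c], False
-- ===== Notes on version B (the rewrite author's own statement) =====
-- stated objective: alternative
-- what changed: Conflict is decided by a separate pre-scan over the raw clauses using an all-elements-equal-(-literal) test (no set is ever constructed or subtracted on that path), and the simplified sets are built only in the no-conflict case; A instead builds each set, mutates it, and interleaves conflict detection with an early break.
import Mathlib
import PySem

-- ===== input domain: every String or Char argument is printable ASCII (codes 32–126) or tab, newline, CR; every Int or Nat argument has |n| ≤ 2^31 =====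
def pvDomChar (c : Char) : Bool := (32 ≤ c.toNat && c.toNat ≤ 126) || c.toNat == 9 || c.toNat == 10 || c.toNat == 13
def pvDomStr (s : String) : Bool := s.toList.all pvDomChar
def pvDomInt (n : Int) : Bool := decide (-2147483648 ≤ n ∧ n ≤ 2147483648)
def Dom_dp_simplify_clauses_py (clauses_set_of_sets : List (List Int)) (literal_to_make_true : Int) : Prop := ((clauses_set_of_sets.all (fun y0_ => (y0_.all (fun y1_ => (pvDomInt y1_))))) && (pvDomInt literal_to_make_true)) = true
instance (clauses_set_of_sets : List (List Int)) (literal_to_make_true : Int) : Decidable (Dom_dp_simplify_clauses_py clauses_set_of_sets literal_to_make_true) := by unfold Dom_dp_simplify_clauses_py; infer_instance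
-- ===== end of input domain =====

-- B decides conflict by a separate pre-scan of the raw clauses (all-elements-equal-(-literal)
-- test, no set construction) and builds the simplified sets only when no conflict exists;
-- objective: alternative decomposition, same cost.

-- ===== PORT A =====
-- The loop of A: accumulates new_clauses and the conflict flag; 'break' on an empty
-- clause is the ([], true) return (both of A's conflict branches set conflict = True
-- and break, so they are one outcome).
def dpLoopA (lit : Int) : List (List Int) → List (List Int) × Bool
  | [] => ([], false)
  | c_orig :: rest =>
    let c := PySem.Set.ofList c_orig            -- c = set(c_orig)
    if PySem.Set.contains c lit then dpLoopA lit rest   -- clause satisfied: continue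
    else
      -- if -lit in c: c.remove(-lit)
      let c1 := if PySem.Set.contains c (-lit) then PySem.Set.discard c (-lit) else c
      if PySem.Set.len c1 == 0 then ([], true)  -- 'if not c': conflict = True; break
      else
        let r := dpLoopA lit rest
        (c1 :: r.1, r.2)                        -- new_clauses.append(c)

def dp_simplify_clauses_py (clauses_set_of_sets : List (List Int)) (literal_to_make_true : Int) : List (List Int) × Bool :=
  let r := dpLoopA literal_to_make_true clauses_set_of_sets
  if r.2 then ([([] : List Int)], true) else (r.1, false)

-- ===== PORT B =====
def dp_simplify_clauses_py_alt (clauses_set_of_sets : List (List Int)) (literal_to_make_true : Int) : List (List Int) × Bool :=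
  -- phase 1: 'for c in clauses: if lit not in c and all(x == -lit for x in c): return [set()], True'
  if clauses_set_of_sets.any
      (fun c => !(c.contains literal_to_make_true) && c.all (fun x => x == -literal_to_make_true))
  then ([([] : List Int)], true)
  -- phase 2: '[set(c) - {-lit} for c in clauses if lit not in c], False'
  else ((clauses_set_of_sets.filter (fun c => !(c.contains literal_to_make_true))).map
          (fun c => PySem.Set.diff (PySem.Set.ofList c) [-literal_to_make_true]), false)

-- ===== PRECONDITION & SPEC =====
def Spec_dp_simplify_clauses_py (clauses_set_of_sets : List (List Int)) (literal_to_make_true : Int) (out : List (List Int) × Bool) : Prop := out = dp_simplify_clauses_py_alt clauses_set_of_sets literal_to_make_true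
instance (clauses_set_of_sets : List (List Int)) (literal_to_make_true : Int) (out : List (List Int) × Bool) : Decidable (Spec_dp_simplify_clauses_py clauses_set_of_sets literal_to_make_true out) := by unfold Spec_dp_simplify_clauses_py; infer_instance

-- ===== CLAIM (what is proved, stated in full; the proofs are below) =====
def Claim_equal_dp_simplify_clauses_py : Prop := ∀ (clauses_set_of_sets : List (List Int)) (literal_to_make_true : Int), Dom_dp_simplify_clauses_py clauses_set_of_sets literal_to_make_true → Spec_dp_simplify_clauses_py clauses_set_of_sets literal_to_make_true (dp_simplify_clauses_py clauses_set_of_sets literal_to_make_true)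

-- ===== LEMMAS AND PROOFS =====

-- A's per-clause value (conditional discard of -lit) equals 'set(c) - {-lit}'.
theorem perClause_eq (c : List Int) (lit : Int) :
    (if PySem.Set.contains (PySem.Set.ofList c) (-lit)
       then PySem.Set.discard (PySem.Set.ofList c) (-lit)
       else PySem.Set.ofList c)
    = PySem.Set.diff (PySem.Set.ofList c) [-lit] := by
  have hdiff : PySem.Set.diff (PySem.Set.ofList c) [-lit]
      = (PySem.Set.ofList c).filter (fun a => !(a == -lit)) := by
    show (PySem.Set.ofList c).filter _ = _
    apply List.filter_congr
    intro a _
    by_cases h : a = -lit <;> simp [h]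
  have hdisc : PySem.Set.discard (PySem.Set.ofList c) (-lit)
      = (PySem.Set.ofList c).filter (fun a => !(a == -lit)) := rfl
  by_cases h : (-lit) ∈ PySem.Set.ofList c
  · rw [if_pos (by simpa [PySem.Set.contains_iff] using h), hdisc, hdiff]
  · rw [if_neg (by simpa [PySem.Set.contains_iff] using h), hdiff]
    symm
    apply List.filter_eq_self.mpr
    intro a ha
    have hne : a ≠ -lit := fun e => h (e ▸ ha)
    simp [hne]

-- 'set(c) - {-lit} is empty' coincides with B's raw-clause test 'all(x == -lit for x in c)'.
theorem emptyTest_eq (c : List Int) (lit : Int) :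
    (PySem.Set.len (PySem.Set.diff (PySem.Set.ofList c) [-lit]) == 0)
    = c.all (fun x => x == -lit) := by
  by_cases h : ∀ x ∈ c, x = -lit
  · have hnil : PySem.Set.diff (PySem.Set.ofList c) [-lit] = [] := by
      apply List.filter_eq_nil_iff.mpr
      intro a ha
      have : a ∈ c := by simpa [PySem.Set.mem_ofList] using ha
      simp [h a this]
    simp [hnil, PySem.Set.len, List.all_eq_true]
    exact h
  · push_neg at h
    obtain ⟨x, hx, hne⟩ := h
    have hxd : x ∈ PySem.Set.diff (PySem.Set.ofList c) [-lit] := by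
      apply List.mem_filter.mpr
      exact ⟨by simpa [PySem.Set.mem_ofList] using hx, by simp [hne]⟩
    have hnn : PySem.Set.diff (PySem.Set.ofList c) [-lit] ≠ [] :=
      fun e => by simp [e] at hxd
    have : ¬ (PySem.Set.len (PySem.Set.diff (PySem.Set.ofList c) [-lit]) == 0) = true := by
      simpa [PySem.Set.len] using hnn
    rw [Bool.eq_false_iff.mpr this]
    symm
    simp [List.all_eq_true]
    exact ⟨x, hx, hne⟩

-- Characterise A's loop by the filtered/mapped list and its empty-clause scan.
theorem loopA_characterisation (lit : Int) (cl : List (List Int)) :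
    (dpLoopA lit cl).2
      = ((cl.filter (fun c => !(c.contains lit))).map
          (fun c => PySem.Set.diff (PySem.Set.ofList c) [-lit])).any
          (fun c => PySem.Set.len c == 0)
    ∧ ((dpLoopA lit cl).2 = false →
        (dpLoopA lit cl).1
          = (cl.filter (fun c => !(c.contains lit))).map
              (fun c => PySem.Set.diff (PySem.Set.ofList c) [-lit])) := by
  induction cl with
  | nil => exact ⟨rfl, fun _ => rfl⟩
  | cons c rest ih =>
    simp only [dpLoopA, perClause_eq]
    by_cases hmem : lit ∈ c
    · have hcont : c.contains lit = true := by simpa using hmem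
      rw [if_pos (by simpa [PySem.Set.contains_iff, PySem.Set.mem_ofList] using hmem)]
      simp only [List.filter_cons, hcont, Bool.not_true, Bool.false_eq_true, if_false]
      exact ih
    · have hcont : c.contains lit = false := by simpa using hmem
      rw [if_neg (by simpa [PySem.Set.contains_iff, PySem.Set.mem_ofList] using hmem)]
      simp only [List.filter_cons, hcont, Bool.not_false, if_true, List.map_cons, List.any_cons]
      by_cases hE : (PySem.Set.len (PySem.Set.diff (PySem.Set.ofList c) [-lit]) == 0) = true
      · rw [if_pos hE]
        have hE' : PySem.Set.diff (PySem.Set.ofList c) [-lit] = [] := by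
          simpa [PySem.Set.len] using hE
        exact ⟨by simp [hE'], fun h => by simp at h⟩
      · rw [if_neg hE]
        refine ⟨?_, fun hf => ?_⟩
        · have hE' : ¬ PySem.Set.diff (PySem.Set.ofList c) [-lit] = [] := by
            simpa [PySem.Set.len] using hE
          simp [hE', ih.1]
        · simp only [List.cons.injEq, true_and]
          exact ih.2 hf

-- B's phase-1 scan over raw clauses equals the empty-clause scan over the built sets.
theorem anyScan_eq (lit : Int) (cl : List (List Int)) :
    cl.any (fun c => !(c.contains lit) && c.all (fun x => x == -lit))
      = ((cl.filter (fun c => !(c.contains lit))).map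
          (fun c => PySem.Set.diff (PySem.Set.ofList c) [-lit])).any
          (fun c => PySem.Set.len c == 0) := by
  induction cl with
  | nil => rfl
  | cons c rest ih =>
    rw [List.any_cons, List.filter_cons]
    by_cases hmem : lit ∈ c
    · have hcont : c.contains lit = true := by simpa using hmem
      rw [hcont, if_neg (by simp [hmem])]
      simpa using ih
    · have hcont : c.contains lit = false := by simpa using hmem
      rw [hcont, if_pos (by simp [hmem]), List.map_cons, List.any_cons, emptyTest_eq, ih]
      simp

-- ===== VERDICT (by name: the statement is the Claim_ definition above) =====
theorem dp_simplify_clauses_py_spec : Claim_equal_dp_simplify_clauses_py := by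
  intro cl lit _
  unfold Spec_dp_simplify_clauses_py dp_simplify_clauses_py dp_simplify_clauses_py_alt
  obtain ⟨hflag, hlist⟩ := loopA_characterisation lit cl
  rw [anyScan_eq]
  by_cases h : (dpLoopA lit cl).2 = true
  · rw [if_pos h, if_pos (hflag ▸ h)]
  · have h' : (dpLoopA lit cl).2 = false := by simpa using h
    rw [if_neg h, if_neg (by rw [← hflag]; exact h)]
    exact Prod.ext (hlist h') rfl
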